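-- pv_equiv track=rewrite | github.com/Suk022/A2OJ-ladder | dl-1/236A.py | distinct_letter
-- ===== SOURCE A (Python) =====
-- def distinct_letter(string):
--     arr = list(string)
--     distinct_letter_arr = []
--     for char in arr:
--         if char not in distinct_letter_arr:
--             distinct_letter_arr.append(char)
--
--     distinct_no = len(distinct_letter_arr)
--     if distinct_no % 2 == 0 :
--         return 'CHAT WITH HER!'
--     else:
--         return 'IGNORE HIM!'
-- ===== SOURCE B (Python) =====
-- def distinct_letter(string):
--     chars = sorted(string)
--     count = 0
--     prev = None
--     for c in chars:
--         if c != prev: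
--             count += 1
--         prev = c
--     if count % 2 == 0:
--         return 'CHAT WITH HER!'
--     else:
--         return 'IGNORE HIM!'
-- ===== Notes on version B (the rewrite author's own statement) =====
-- stated objective: alternative
-- what changed: Counts distinct characters by sorting the string and counting adjacent changes in one scan, instead of quadratic membership tests against an accumulating list.
import Mathlib
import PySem

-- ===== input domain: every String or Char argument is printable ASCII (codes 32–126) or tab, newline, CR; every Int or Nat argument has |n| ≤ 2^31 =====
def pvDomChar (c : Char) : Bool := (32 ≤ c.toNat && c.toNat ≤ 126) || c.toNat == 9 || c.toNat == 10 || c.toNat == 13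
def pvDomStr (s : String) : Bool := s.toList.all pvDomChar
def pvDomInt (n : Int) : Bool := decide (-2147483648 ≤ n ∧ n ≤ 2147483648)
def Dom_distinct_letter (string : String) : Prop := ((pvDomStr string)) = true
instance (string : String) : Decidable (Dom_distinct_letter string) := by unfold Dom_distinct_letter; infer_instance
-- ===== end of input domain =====

-- B counts distinct characters by sorting and counting adjacent changes, instead of A's
-- quadratic membership tests against an accumulating list; return value equivalence proved.

-- ===== PORT A =====
def distinct_letter (string : String) : String :=
  let arr := string.toList
  let distinct_letter_arr :=
    arr.foldl (fun acc char => if char ∈ acc then acc else acc ++ [char]) []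
  let distinct_no := distinct_letter_arr.length
  if distinct_no % 2 == 0 then "CHAT WITH HER!" else "IGNORE HIM!"

-- ===== PORT B =====
def distinct_letter_alt (string : String) : String :=
  let chars := PySem.List.sorted string.toList (fun c => c) false
  let st := chars.foldl
    (fun (st : Nat × Option Char) c => (if some c ≠ st.2 then st.1 + 1 else st.1, some c))
    (0, none)
  if st.1 % 2 == 0 then "CHAT WITH HER!" else "IGNORE HIM!"

-- ===== PRECONDITION & SPEC =====
def Spec_distinct_letter (string : String) (out : String) : Prop := out = distinct_letter_alt string
instance (string : String) (out : String) : Decidable (Spec_distinct_letter string out) := by unfold Spec_distinct_letter; infer_instance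

-- ===== CLAIM (what is proved, stated in full; the proofs are below) =====
def Claim_equal_distinct_letter : Prop := ∀ (string : String), Dom_distinct_letter string → Spec_distinct_letter string (distinct_letter string)

-- ===== LEMMAS AND PROOFS =====

-- A's accumulation: nodup, and its elements are exactly acc's plus l's.
theorem a_fold_inv (l : List Char) : ∀ (acc : List Char), acc.Nodup →
    (l.foldl (fun acc char => if char ∈ acc then acc else acc ++ [char]) acc).Nodup ∧
    (l.foldl (fun acc char => if char ∈ acc then acc else acc ++ [char]) acc).toFinset
      = acc.toFinset ∪ l.toFinset := by
  induction l with
  | nil => intro acc h; simp [h]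
  | cons c t ih =>
    intro acc h
    by_cases hc : c ∈ acc
    · have hi := ih acc h
      simp only [List.foldl_cons, if_pos hc]
      refine ⟨hi.1, ?_⟩
      rw [hi.2]
      ext x
      simp only [Finset.mem_union, List.mem_toFinset, List.mem_cons]
      constructor
      · tauto
      · rintro (h1 | rfl | h1) <;> tauto
    · have hn : (acc ++ [c]).Nodup := by
        simp only [List.nodup_append, List.nodup_cons, List.not_mem_nil,
          not_false_iff, List.nodup_nil, and_true, true_and, h]
        exact fun a ha b hb => by
          rw [List.mem_singleton] at hb
          exact fun e => hc ((e.trans hb) ▸ ha)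
      have hi := ih (acc ++ [c]) hn
      simp only [List.foldl_cons, if_neg hc]
      refine ⟨hi.1, ?_⟩
      rw [hi.2]
      ext x
      simp only [Finset.mem_union, List.mem_toFinset, List.mem_cons, List.mem_append,
        List.mem_cons, List.not_mem_nil]
      tauto

-- B's scan with prev = some p, p a lower bound of a sorted list: counts |elements ≠ p|.
theorem b_fold_some (l : List Char) : ∀ (n : Nat) (p : Char),
    l.Pairwise (· ≤ ·) → (∀ x ∈ l, p ≤ x) →
    (l.foldl (fun (st : Nat × Option Char) c =>
        (if some c ≠ st.2 then st.1 + 1 else st.1, some c)) (n, some p)).1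
      = n + (l.toFinset.erase p).card := by
  induction l with
  | nil => intro n p _ _; simp
  | cons c t ih =>
    intro n p hp hlb
    have ht : t.Pairwise (· ≤ ·) := hp.of_cons
    have hct : ∀ x ∈ t, c ≤ x := fun x hx => (List.pairwise_cons.mp hp).1 x hx
    have hpc : p ≤ c := hlb c (by simp)
    by_cases hcp : c = p
    · have hne : ¬ (some c ≠ some p) := by simp [hcp]
      simp only [List.foldl_cons, if_neg hne]
      rw [ih n c ht hct, hcp]
      congr 2
      simp [Finset.erase_insert_eq_erase]
    · have hlt : p < c := lt_of_le_of_ne hpc (Ne.symm hcp)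
      have hne : (some c ≠ some p) := by simp [hcp]
      simp only [List.foldl_cons, if_pos hne]
      rw [ih (n + 1) c ht hct]
      have hnp : p ∉ insert c t.toFinset := by
        simp only [Finset.mem_insert, List.mem_toFinset]
        rintro (rfl | hx)
        · exact absurd rfl (ne_of_lt hlt)
        · exact absurd (hct p hx) (not_le_of_gt hlt)
      have : ((c :: t).toFinset.erase p) = insert c t.toFinset := by
        simp [List.toFinset_cons, Finset.erase_eq_of_notMem hnp]
      rw [this]
      have hc' : insert c t.toFinset = insert c (t.toFinset.erase c) := by
        ext x
        simp only [Finset.mem_insert, Finset.mem_erase, ne_eq]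
        tauto
      rw [hc', Finset.card_insert_of_notMem (Finset.notMem_erase c _)]
      omega

-- B's scan from the initial state counts the distinct elements of a sorted list.
theorem b_fold_none (l : List Char) (h : l.Pairwise (· ≤ ·)) :
    (l.foldl (fun (st : Nat × Option Char) c =>
        (if some c ≠ st.2 then st.1 + 1 else st.1, some c)) (0, none)).1
      = l.toFinset.card := by
  cases l with
  | nil => simp
  | cons c t =>
    have ht : t.Pairwise (· ≤ ·) := h.of_cons
    have hct : ∀ x ∈ t, c ≤ x := fun x hx => (List.pairwise_cons.mp h).1 x hx
    have hne : (some c ≠ (none : Option Char)) := by simp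
    simp only [List.foldl_cons, if_pos hne]
    rw [b_fold_some t 1 c ht hct]
    have : (c :: t).toFinset = insert c (t.toFinset.erase c) := by
      ext x
      simp only [List.toFinset_cons, Finset.mem_insert, Finset.mem_erase, ne_eq,
        List.mem_toFinset]
      tauto
    rw [this, Finset.card_insert_of_notMem (Finset.notMem_erase c _)]
    omega

-- ===== VERDICT (by name: the statement is the Claim_ definition above) =====
theorem distinct_letter_spec : Claim_equal_distinct_letter := by
  intro s _
  unfold Spec_distinct_letter distinct_letter distinct_letter_alt
  have ha := a_fold_inv s.toList [] (by simp)
  have hcard : (s.toList.foldl (fun acc char => if char ∈ acc then acc else acc ++ [char]) []).length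
      = s.toList.toFinset.card := by
    rw [← List.toFinset_card_of_nodup ha.1, ha.2]; simp
  have hperm : (PySem.List.sorted s.toList (fun c => c) false).Perm s.toList :=
    PySem.List.sorted_perm _ _ _
  have hsorted : (PySem.List.sorted s.toList (fun c => c) false).Pairwise (· ≤ ·) :=
    PySem.List.sorted_pairwise _ _
  have hb := b_fold_none _ hsorted
  rw [List.toFinset_eq_of_perm _ _ hperm] at hb
  simp only [hcard, hb]
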